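-- pv_equiv track=rewrite | github.com/FSPAkash/FPO_POC | build_fpo_pdf_docs.py | parse_deployment_requirements
-- ===== SOURCE A (Python) =====
-- def parse_deployment_requirements(lines: list[str]) -> list[tuple[str, list[str]]]:
--     sections: list[tuple[str, list[str]]] = []
--     current_heading = ""
--     current_items: list[str] = []
--
--     for line in lines:
--         if line.startswith("Priority "):
--             if current_heading:
--                 sections.append((current_heading, current_items))
--             current_heading = line
--             current_items = []
--         else:
--             current_items.append(line)
--
--     if current_heading:
--         sections.append((current_heading, current_items))
--
--     return sections
-- ===== SOURCE B (Python) =====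
-- def parse_deployment_requirements(lines: list[str]) -> list[tuple[str, list[str]]]:
--     heads = [(i, line) for i, line in enumerate(lines) if line.startswith("Priority ")]
--     bounds = [i for i, _ in heads][1:] + [len(lines)]
--     return [(line, lines[i + 1:j]) for (i, line), j in zip(heads, bounds)]
-- ===== Notes on version B (the rewrite author's own statement) =====
-- stated objective: alternative
-- what changed: Replaces A's accumulate-and-flush state machine (mutable current heading/items with end-of-loop flush) by a boundary scan: collect the heading indices once, pair each with the next heading index (or len), and slice the items out.
import Mathlib
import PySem

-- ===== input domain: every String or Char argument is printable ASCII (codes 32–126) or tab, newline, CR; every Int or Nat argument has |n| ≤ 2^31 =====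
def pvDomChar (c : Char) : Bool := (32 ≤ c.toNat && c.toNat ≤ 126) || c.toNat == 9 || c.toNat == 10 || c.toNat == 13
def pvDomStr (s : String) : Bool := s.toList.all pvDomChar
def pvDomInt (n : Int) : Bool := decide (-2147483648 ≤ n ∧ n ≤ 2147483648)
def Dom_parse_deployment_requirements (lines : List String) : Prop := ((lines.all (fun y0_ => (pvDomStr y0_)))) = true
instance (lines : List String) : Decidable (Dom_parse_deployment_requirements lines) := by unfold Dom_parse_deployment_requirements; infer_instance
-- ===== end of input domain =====

-- B replaces A's accumulate-and-flush state machine by a heading-index boundary scan with slicing (objective: alternative).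

-- ===== PORT A =====
-- one loop step of A: state = (sections, current_heading, current_items); "" plays Python's falsy heading
def pvStepA (st : List (String × List String) × String × List String) (line : String) :
    List (String × List String) × String × List String :=
  if PySem.Str.startswith line "Priority " then
    ((if st.2.1 ≠ "" then st.1 ++ [(st.2.1, st.2.2)] else st.1), line, [])
  else
    (st.1, st.2.1, st.2.2 ++ [line])

def parse_deployment_requirements (lines : List String) : List (String × List String) :=
  let st := lines.foldl pvStepA ([], "", [])
  if st.2.1 ≠ "" then st.1 ++ [(st.2.1, st.2.2)] else st.1

-- ===== PORT B =====
def parse_deployment_requirements_alt (lines : List String) : List (String × List String) :=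
  let heads := (PySem.List.enumerate lines 0).filter (fun p => PySem.Str.startswith p.2 "Priority ")
  let bounds := (heads.map (·.1)).drop 1 ++ [(lines.length : Int)]
  (heads.zip bounds).map (fun p => (p.1.2, PySem.List.slice lines (some (p.1.1 + 1)) (some p.2)))

-- ===== PRECONDITION & SPEC =====
def Spec_parse_deployment_requirements (lines : List String) (out : List (String × List String)) : Prop := out = parse_deployment_requirements_alt lines
instance (lines : List String) (out : List (String × List String)) : Decidable (Spec_parse_deployment_requirements lines out) := by unfold Spec_parse_deployment_requirements; infer_instance

-- ===== CLAIM (what is proved, stated in full; the proofs are below) =====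
def Claim_equal_parse_deployment_requirements : Prop := ∀ (lines : List String), Dom_parse_deployment_requirements lines → Spec_parse_deployment_requirements lines (parse_deployment_requirements lines)

-- ===== LEMMAS AND PROOFS =====

-- shorthand for the heading test
def pvIsH (l : String) : Bool := PySem.Str.startswith l "Priority "

-- bridge spec: right fold building (lines-before-first-heading, sections)
def pvBridge (lines : List String) : List String × List (String × List String) :=
  lines.foldr (fun l st => if pvIsH l then ([], (l, st.1) :: st.2) else (l :: st.1, st.2)) ([], [])

-- finish of A's loop state
def pvFin (st : List (String × List String) × String × List String) : List (String × List String) :=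
  if st.2.1 ≠ "" then st.1 ++ [(st.2.1, st.2.2)] else st.1

theorem pvL1 (lines : List String) (s : List (String × List String)) (h : String) (its : List String) :
    pvFin (lines.foldl pvStepA (s, h, its)) = s ++ pvFin (lines.foldl pvStepA ([], h, its)) := by
  induction lines generalizing s h its with
  | nil => simp only [List.foldl_nil, pvFin]; split_ifs <;> simp
  | cons l ls ih =>
    by_cases hh : PySem.Str.startswith l "Priority "
    · simp only [List.foldl_cons, pvStepA, hh, if_true]
      rw [ih (if h ≠ "" then s ++ [(h, its)] else s) l [],
          ih (if h ≠ "" then [] ++ [(h, its)] else []) l []]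
      split_ifs <;> simp
    · simp only [List.foldl_cons, pvStepA, hh, if_false, Bool.false_eq_true]
      exact ih s h (its ++ [l])

theorem pvL2 (lines : List String) (h : String) (its : List String) (hne : h ≠ "") :
    pvFin (lines.foldl pvStepA ([], h, its)) = (h, its ++ (pvBridge lines).1) :: (pvBridge lines).2 := by
  induction lines generalizing h its with
  | nil => simp [pvFin, pvBridge, hne]
  | cons l ls ih =>
    by_cases hl : pvIsH l
    · have hl' : PySem.Str.startswith l "Priority " = true := hl
      have hlne : l ≠ "" := by
        intro he; subst he; exact absurd hl (by decide)
      have hstep : pvStepA ([], h, its) l = ([(h, its)], l, []) := by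
        simp only [pvStepA, hl']; simp [hne]
      have hbr : pvBridge (l :: ls) = ([], (l, (pvBridge ls).1) :: (pvBridge ls).2) := by
        simp [pvBridge, hl]
      rw [List.foldl_cons, hstep, pvL1, ih l [] hlne, hbr]
      simp
    · have hl' : PySem.Str.startswith l "Priority " = false := by simpa [pvIsH] using hl
      have hstep : pvStepA ([], h, its) l = ([], h, its ++ [l]) := by
        simp only [pvStepA, hl']; simp
      have hbr : pvBridge (l :: ls) = (l :: (pvBridge ls).1, (pvBridge ls).2) := by
        simp [pvBridge, hl]
      rw [List.foldl_cons, hstep, ih h (its ++ [l]) hne, hbr]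
      simp

theorem pvL3 (lines : List String) (its : List String) :
    pvFin (lines.foldl pvStepA ([], "", its)) = (pvBridge lines).2 := by
  induction lines generalizing its with
  | nil => simp [pvFin, pvBridge]
  | cons l ls ih =>
    by_cases hl : pvIsH l
    · have hl' : PySem.Str.startswith l "Priority " = true := hl
      have hlne : l ≠ "" := by
        intro he; subst he; exact absurd hl (by decide)
      have hstep : pvStepA ([], "", its) l = ([], l, []) := by
        simp only [pvStepA, hl']; simp
      have hbr : pvBridge (l :: ls) = ([], (l, (pvBridge ls).1) :: (pvBridge ls).2) := by
        simp [pvBridge, hl]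
      rw [List.foldl_cons, hstep, pvL2 ls l [] hlne, hbr]
      simp
    · have hl' : PySem.Str.startswith l "Priority " = false := by simpa [pvIsH] using hl
      have hstep : pvStepA ([], "", its) l = ([], "", its ++ [l]) := by
        simp only [pvStepA, hl']; simp
      have hbr : pvBridge (l :: ls) = (l :: (pvBridge ls).1, (pvBridge ls).2) := by
        simp [pvBridge, hl]
      rw [List.foldl_cons, hstep, ih (its ++ [l]), hbr]

theorem pvA_eq_bridge (lines : List String) :
    parse_deployment_requirements lines = (pvBridge lines).2 := pvL3 lines []

-- B-side: heads of a list
def pvHeads (ls : List String) : List (Int × String) :=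
  (PySem.List.enumerate ls 0).filter (fun p => PySem.Str.startswith p.2 "Priority ")

theorem pvEnumShift {α : Type} (ls : List α) (s : Int) :
    PySem.List.enumerate ls (s + 1) = (PySem.List.enumerate ls s).map (fun p => (p.1 + 1, p.2)) := by
  induction ls generalizing s with
  | nil => simp [PySem.List.enumerate_nil]
  | cons x xs ih => simp [PySem.List.enumerate_cons, ih (s + 1), ih s]

theorem pvHeads_cons (l : String) (ls : List String) :
    pvHeads (l :: ls) =
      (if pvIsH l then [((0 : Int), l)] else []) ++ (pvHeads ls).map (fun p => (p.1 + 1, p.2)) := by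
  simp only [pvHeads, PySem.List.enumerate_cons]
  rw [show (0 : Int) + 1 = 0 + 1 from rfl, pvEnumShift, List.filter_cons, List.filter_map]
  by_cases hl : pvIsH l <;> simp [pvIsH] at hl <;> simp [hl, pvIsH] <;> rfl

theorem pvHeads_nonneg (ls : List String) (p : Int × String) (hp : p ∈ pvHeads ls) : 0 ≤ p.1 := by
  have := List.mem_of_mem_filter hp
  rw [PySem.List.mem_enumerate_iff] at this
  obtain ⟨k, _, hk⟩ := this
  simp [hk]

theorem pvP1 (ls : List String) (h0 : pvHeads ls = []) : pvBridge ls = (ls, []) := by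
  induction ls with
  | nil => simp [pvBridge]
  | cons l ls ih =>
    rw [pvHeads_cons] at h0
    by_cases hl : pvIsH l
    · simp [hl] at h0
    · simp [hl] at h0
      simp only [pvBridge, List.foldr_cons]
      rw [show (List.foldr _ ([], []) ls) = pvBridge ls from rfl, ih (by simpa using h0)]
      simp [hl]

theorem pvP2 (ls : List String) (k : Int) (x : String) (rest : List (Int × String))
    (h0 : pvHeads ls = (k, x) :: rest) : (pvBridge ls).1 = ls.take k.toNat := by
  induction ls generalizing k x rest with
  | nil => simp [pvHeads, PySem.List.enumerate_nil] at h0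
  | cons l ls ih =>
    rw [pvHeads_cons] at h0
    by_cases hl : pvIsH l
    · simp only [hl, if_true, List.singleton_append, List.cons.injEq, Prod.mk.injEq] at h0
      have hbr : pvBridge (l :: ls) = ([], (l, (pvBridge ls).1) :: (pvBridge ls).2) := by
        simp [pvBridge, hl]
      rw [hbr, ← h0.1.1]
      simp
    · simp only [hl, if_false, Bool.false_eq_true, List.nil_append] at h0
      have hbr : pvBridge (l :: ls) = (l :: (pvBridge ls).1, (pvBridge ls).2) := by
        simp [pvBridge, hl]
      cases hh : pvHeads ls with
      | nil => rw [hh] at h0; simp at h0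
      | cons q qs =>
        rw [hh, List.map_cons] at h0
        have hq : 0 ≤ q.1 := pvHeads_nonneg ls q (by rw [hh]; exact List.mem_cons_self ..)
        have hk : k = q.1 + 1 := by
          have := congrArg (fun t => t.headD (0, "")) h0
          simp at this
          exact this.1.symm
        have hrec : (pvBridge ls).1 = ls.take q.1.toNat :=
          ih q.1 q.2 qs hh
        rw [hbr, hk]
        simp only []
        rw [show (q.1 + 1).toNat = q.1.toNat + 1 by omega, List.take_succ_cons, hrec]

theorem pvSliceCons (x : String) (xs : List String) (a b : Int) (ha : 0 ≤ a) (hb : 0 ≤ b) :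
    PySem.List.slice (x :: xs) (some (a + 1)) (some (b + 1)) = PySem.List.slice xs (some a) (some b) := by
  rw [PySem.List.slice_toNat _ (by omega : (0:Int) ≤ a + 1) (by omega : (0:Int) ≤ b + 1),
      PySem.List.slice_toNat _ ha hb]
  rw [show (a + 1).toNat = a.toNat + 1 by omega, show (b + 1).toNat = b.toNat + 1 by omega]
  simp only [List.drop_succ_cons]
  congr 1
  omega

theorem pvBoundsNonneg (ls : List String) (b : Int)
    (hb : b ∈ ((pvHeads ls).map (·.1)).drop 1 ++ [(ls.length : Int)]) : 0 ≤ b := by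
  rcases List.mem_append.mp hb with h | h
  · obtain ⟨p, hp, rfl⟩ := List.mem_map.mp (List.mem_of_mem_drop h)
    exact pvHeads_nonneg ls p hp
  · simp at h; omega

theorem pvShiftTail (l : String) (ls : List String) :
    ((((pvHeads ls).map (fun p => (p.1 + 1, p.2))).zip
        ((((pvHeads ls).map (·.1)).drop 1 ++ [(ls.length : Int)]).map (· + 1))).map
      (fun p => (p.1.2, PySem.List.slice (l :: ls) (some (p.1.1 + 1)) (some p.2)))) =
    parse_deployment_requirements_alt ls := by
  rw [List.zip_map, List.map_map]
  rw [parse_deployment_requirements_alt]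
  apply List.map_congr_left
  intro q hq
  obtain ⟨hq1, hq2⟩ := List.of_mem_zip hq
  have h1 : 0 ≤ q.1.1 := pvHeads_nonneg ls q.1 hq1
  have h2 : 0 ≤ q.2 := pvBoundsNonneg ls q.2 hq2
  simp only [Prod.map, Function.comp]
  exact congrArg (Prod.mk q.1.2) (pvSliceCons l ls (q.1.1 + 1) q.2 (by omega) h2)

theorem pvB_eq_bridge (lines : List String) :
    parse_deployment_requirements_alt lines = (pvBridge lines).2 := by
  induction lines with
  | nil => simp [parse_deployment_requirements_alt, PySem.List.enumerate_nil, pvBridge]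
  | cons l ls ih =>
    rw [parse_deployment_requirements_alt]
    rw [show (PySem.List.enumerate (l :: ls) 0).filter
          (fun p => PySem.Str.startswith p.2 "Priority ") = pvHeads (l :: ls) from rfl,
        pvHeads_cons]
    have hlen : ((l :: ls).length : Int) = (ls.length : Int) + 1 := by
      push_cast [List.length_cons]; ring
    by_cases hl : pvIsH l
    · -- heading head: first section (l, items up to next heading), tail = B of ls
      have hb2 : pvBridge (l :: ls) = ([], (l, (pvBridge ls).1) :: (pvBridge ls).2) := by
        simp [pvBridge, hl]
      simp only [hl, if_true, List.singleton_append]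
      cases hh : pvHeads ls with
      | nil =>
        have hbr := pvP1 ls hh
        simp only [List.map_nil, List.map_cons, hlen, List.drop_zero, List.drop_succ_cons,
          List.nil_append, List.zip_cons_cons, List.zip_nil_right]
        rw [pvSliceCons l ls 0 (ls.length : Int) le_rfl (by positivity)]
        rw [hb2, hbr]
        simp [PySem.List.slice_zero_start, PySem.List.slice_to_natCast]
      | cons q qs =>
        have hq1 : 0 ≤ q.1 := pvHeads_nonneg ls q (by rw [hh]; exact List.mem_cons_self ..)
        have ht := pvShiftTail l ls
        rw [hh] at ht
        simp only [List.map_cons, List.drop_succ_cons, List.drop_zero, List.cons_append]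
        rw [List.zip_cons_cons, List.map_cons, hlen]
        rw [show (List.map (fun x : Int × String => x.1)
              (List.map (fun p : Int × String => (p.1 + 1, p.2)) qs) ++ [(ls.length : Int) + 1]) =
            List.map (· + 1) (List.map (fun x : Int × String => x.1) qs ++ [(ls.length : Int)]) from by
          simp [List.map_map]]
        rw [show ((q.1 + 1, q.2) :: List.map (fun p : Int × String => (p.1 + 1, p.2)) qs) =
            List.map (fun p : Int × String => (p.1 + 1, p.2)) (q :: qs) from by simp]
        rw [show ((q :: qs).map (·.1)).drop 1 = qs.map (·.1) from by simp] at ht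
        rw [ht, ih]
        rw [pvSliceCons l ls 0 q.1 le_rfl hq1]
        rw [hb2, PySem.List.slice_zero_start, PySem.List.slice_to ls hq1,
            pvP2 ls q.1 q.2 qs hh]
    · -- non-heading head: same sections as for ls
      have hb2 : pvBridge (l :: ls) = (l :: (pvBridge ls).1, (pvBridge ls).2) := by
        simp [pvBridge, hl]
      simp only [hl, if_false, Bool.false_eq_true, List.nil_append, hlen]
      rw [show ((pvHeads ls).map (fun p : Int × String => (p.1 + 1, p.2))).map (·.1) =
            ((pvHeads ls).map (·.1)).map (· + 1) from by simp only [List.map_map]; rfl]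
      rw [show List.drop 1 (((pvHeads ls).map (·.1)).map (· + 1)) =
            (((pvHeads ls).map (·.1)).drop 1).map (· + 1) from by simp]
      rw [show (((pvHeads ls).map (·.1)).drop 1).map (· + 1) ++ [(ls.length : Int) + 1] =
            (((pvHeads ls).map (·.1)).drop 1 ++ [(ls.length : Int)]).map (· + 1) from by simp]
      rw [pvShiftTail l ls, ih, hb2]

-- ===== VERDICT (by name: the statement is the Claim_ definition above) =====
theorem parse_deployment_requirements_spec : Claim_equal_parse_deployment_requirements := by
  intro lines _
  unfold Spec_parse_deployment_requirements
  rw [pvA_eq_bridge, pvB_eq_bridge]
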